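-- pv_equiv track=rewrite | github.com/JakubKorytko/python-apps | apps/matura_tasks[C]/cryptograms[P]/task_3.py | split_into_fence_of_height_2
-- ===== SOURCE A (Python) =====
-- def split_into_fence_of_height_2(text):
--     """Splits text into fence of height 2."""
--
--     fence = [[], []]
--     letters = 0
--
--     for letter in text:
--         if letter != " ":
--             letters += 1
--             fence[1 - (letters % 2)].append(letter)
--
--     return fence
-- ===== SOURCE B (Python) =====
-- def split_into_fence_of_height_2(text):
--     """Splits text into fence of height 2."""
--     chars = [c for c in text if c != " "]
--     return [chars[0::2], chars[1::2]]
-- ===== Notes on version B (the rewrite author's own statement) =====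
-- stated objective: simpler
-- what changed: Replaces the interleaved parity-counter append loop with a build-then-split decomposition: one filter pass collecting all non-space characters, then two stride-2 slices extract the rows.
import Mathlib
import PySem

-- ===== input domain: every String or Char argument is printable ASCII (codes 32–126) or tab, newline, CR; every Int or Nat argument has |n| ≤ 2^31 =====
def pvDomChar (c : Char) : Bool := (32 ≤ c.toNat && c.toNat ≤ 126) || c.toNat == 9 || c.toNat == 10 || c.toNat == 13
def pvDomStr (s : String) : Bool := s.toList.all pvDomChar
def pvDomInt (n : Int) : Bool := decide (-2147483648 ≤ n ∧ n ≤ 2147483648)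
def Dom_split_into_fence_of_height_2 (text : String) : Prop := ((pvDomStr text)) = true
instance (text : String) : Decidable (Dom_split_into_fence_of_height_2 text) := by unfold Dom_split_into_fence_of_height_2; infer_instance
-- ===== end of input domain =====

-- B replaces A's interleaved parity-counter append loop by a filter pass followed by two
-- stride-2 slices (build-then-split); objective: simpler.

-- iterating a Python str yields one-character strings
def pvStr (c : Char) : String := String.ofList [c]

-- ===== PORT A =====
-- A's loop: state (fence[0], fence[1], letters); append goes to fence[1 - letters % 2].
def pvStepA (s : List String × List String × Int) (letter : Char) :
    List String × List String × Int :=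
  if pvStr letter ≠ " " then
    let letters := s.2.2 + 1
    if 1 - PySem.Int.mod letters 2 = 0 then (s.1 ++ [pvStr letter], s.2.1, letters)
    else (s.1, s.2.1 ++ [pvStr letter], letters)
  else s

def split_into_fence_of_height_2 (text : String) : List (List String) :=
  let st := text.toList.foldl pvStepA ([], [], 0)
  [st.1, st.2.1]

-- ===== PORT B =====
-- exact port of the stride-2 slice xs[0::2] (nonnegative start, step 2)
def pvEvery2 {α : Type} : List α → List α
  | [] => []
  | [x] => [x]
  | x :: _ :: rest => x :: pvEvery2 rest

def split_into_fence_of_height_2_alt (text : String) : List (List String) :=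
  let chars := (text.toList.filter (fun c => pvStr c ≠ " ")).map pvStr
  [pvEvery2 chars, pvEvery2 (chars.drop 1)]

-- ===== PRECONDITION & SPEC =====
def Spec_split_into_fence_of_height_2 (text : String) (out : List (List String)) : Prop := out = split_into_fence_of_height_2_alt text
instance (text : String) (out : List (List String)) : Decidable (Spec_split_into_fence_of_height_2 text out) := by unfold Spec_split_into_fence_of_height_2; infer_instance

-- ===== CLAIM (what is proved, stated in full; the proofs are below) =====
def Claim_equal_split_into_fence_of_height_2 : Prop := ∀ (text : String), Dom_split_into_fence_of_height_2 text → Spec_split_into_fence_of_height_2 text (split_into_fence_of_height_2 text)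

-- ===== LEMMAS AND PROOFS =====

lemma pvEvery2_cons {α : Type} (a : α) (l : List α) :
    pvEvery2 (a :: l) = a :: pvEvery2 (l.drop 1) := by
  cases l <;> simp [pvEvery2]

-- A's loop skips spaces, so folding over the text equals folding over the filtered text
lemma foldA_filter (l : List Char) (s : List String × List String × Int) :
    l.foldl pvStepA s = (l.filter (fun c => pvStr c ≠ " ")).foldl pvStepA s := by
  induction l generalizing s with
  | nil => rfl
  | cons x rest ih =>
    by_cases hx : pvStr x = " "
    · simp [List.filter, hx, List.foldl, pvStepA, ih]
    · simp [List.filter, hx, List.foldl, ih]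

lemma foldA_main (l : List Char) (f0 f1 : List String) (n : Int)
    (hl : ∀ c ∈ l, pvStr c ≠ " ") (hn : 0 ≤ n) :
    l.foldl pvStepA (f0, f1, n) =
      if n % 2 = 0 then
        (f0 ++ pvEvery2 (l.map pvStr), f1 ++ pvEvery2 ((l.map pvStr).drop 1), n + l.length)
      else
        (f0 ++ pvEvery2 ((l.map pvStr).drop 1), f1 ++ pvEvery2 (l.map pvStr), n + l.length) := by
  induction l generalizing f0 f1 n with
  | nil => split_ifs <;> simp [pvEvery2]
  | cons x rest ih =>
    have hx : pvStr x ≠ " " := hl x (by simp)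
    have hrest : ∀ c ∈ rest, pvStr c ≠ " " := fun c hc => hl c (by simp [hc])
    have hmod : PySem.Int.mod (n + 1) 2 = (n + 1) % 2 :=
      PySem.Int.mod_eq_emod_of_pos (by omega)
    by_cases hpar : n % 2 = 0
    · have h1 : 1 - PySem.Int.mod (n + 1) 2 = 0 := by rw [hmod]; omega
      simp only [List.foldl, pvStepA, hx, ne_eq, not_false_iff, h1, if_pos]
      rw [ih _ _ _ hrest (by omega)]
      have h2 : ¬ ((n + 1) % 2 = 0) := by omega
      simp [h2, hpar, pvEvery2_cons, List.append_assoc]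
      omega
    · have h1 : ¬ (1 - PySem.Int.mod (n + 1) 2 = 0) := by rw [hmod]; omega
      simp only [List.foldl, pvStepA, hx, ne_eq, not_false_iff, h1, if_neg, if_true]
      rw [ih _ _ _ hrest (by omega)]
      have h2 : (n + 1) % 2 = 0 := by omega
      simp [h2, hpar, pvEvery2_cons, List.append_assoc]
      omega

-- ===== VERDICT (by name: the statement is the Claim_ definition above) =====
theorem split_into_fence_of_height_2_spec : Claim_equal_split_into_fence_of_height_2 := by
  intro text _
  unfold Spec_split_into_fence_of_height_2 split_into_fence_of_height_2
    split_into_fence_of_height_2_alt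
  rw [foldA_filter]
  rw [foldA_main _ [] [] 0 (fun c hc => of_decide_eq_true (List.mem_filter.mp hc).2) (le_refl 0)]
  simp
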